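-- pv_equiv track=rewrite | github.com/uv-xiao/pto-wsp | python/pto_wsp/linear_layout.py | f2_kernel
-- ===== SOURCE A (Python) =====
-- from typing import List, Tuple, Optional, Sequence
--
-- def f2_kernel(A: List[Tuple[int, ...]]) -> List[Tuple[int, ...]]:
--     """Compute kernel (null space) of binary matrix over F₂.
--
--     Args:
--         A: Binary matrix
--
--     Returns:
--         Basis vectors for kernel of A
--     """
--     if not A:
--         return []
--
--     n_rows = len(A)
--     n_cols = len(A[0])
--
--     # Augment with identity for tracking
--     rows = [list(row) + [1 if i == j else 0 for j in range(n_cols)]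
--             for i, row in enumerate(A)]
--
--     # Gaussian elimination
--     pivot_cols = []
--     for col in range(n_cols):
--         pivot_row = None
--         for row in range(len(pivot_cols), n_rows):
--             if rows[row][col] == 1:
--                 pivot_row = row
--                 break
--
--         if pivot_row is None:
--             continue
--
--         rows[len(pivot_cols)], rows[pivot_row] = rows[pivot_row], rows[len(pivot_cols)]
--         pivot_cols.append(col)
--
--         for row in range(n_rows):
--             if row != len(pivot_cols) - 1 and rows[row][col] == 1:
--                 rows[row] = [a ^ b for a, b in zip(rows[row], rows[len(pivot_cols) - 1])]
--
--     # Free variables are non-pivot columns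
--     free_cols = [c for c in range(n_cols) if c not in pivot_cols]
--
--     # Extract kernel basis
--     kernel_basis = []
--     for free_col in free_cols:
--         vec = [0] * n_cols
--         vec[free_col] = 1
--         for i, pivot_col in enumerate(pivot_cols):
--             vec[pivot_col] = rows[i][free_col]
--         kernel_basis.append(tuple(vec))
--
--     return kernel_basis
-- ===== SOURCE B (Python) =====
-- def f2_kernel(A):
--     """Kernel basis of a binary matrix over F2; no identity augmentation,
--     two-phase elimination: forward to echelon form, then clear above pivots."""
--     if not A:
--         return []
--     n_rows = len(A)
--     n_cols = len(A[0])
--     rows = [list(r) for r in A]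
--     pivot_cols = []
--     # forward phase: row-echelon form
--     for col in range(n_cols):
--         r = len(pivot_cols)
--         pivot_row = None
--         for i in range(r, n_rows):
--             if rows[i][col] == 1:
--                 pivot_row = i
--                 break
--         if pivot_row is None:
--             continue
--         rows[r], rows[pivot_row] = rows[pivot_row], rows[r]
--         pivot_cols.append(col)
--         for i in range(r + 1, n_rows):
--             if rows[i][col] == 1:
--                 rows[i] = [a ^ b for a, b in zip(rows[i], rows[r])]
--     # back phase: clear entries above each pivot, left to right
--     for j, col in enumerate(pivot_cols):
--         for i in range(j):
--             if rows[i][col] == 1: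
--                 rows[i] = [a ^ b for a, b in zip(rows[i], rows[j])]
--     free_cols = [c for c in range(n_cols) if c not in pivot_cols]
--     kernel_basis = []
--     for free_col in free_cols:
--         vec = [0] * n_cols
--         vec[free_col] = 1
--         for i, pivot_col in enumerate(pivot_cols):
--             vec[pivot_col] = rows[i][free_col]
--         kernel_basis.append(tuple(vec))
--     return kernel_basis
-- ===== Notes on version B (the rewrite author's own statement) =====
-- stated objective: alternative
-- what changed: B drops A's dead identity augmentation and replaces the interleaved full elimination (each pivot clears its column in every other row immediately) by two explicit phases: a forward pass eliminating only below each pivot to reach echelon form, then a separate left-to-right back pass clearing entries above each pivot; the extraction of the kernel basis from the reduced rows is unchanged.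
-- outside the precondition, e.g. on f2_kernel([(0, 0), (1,)]): A returns [(0, 1)], B raises IndexError
import Mathlib
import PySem

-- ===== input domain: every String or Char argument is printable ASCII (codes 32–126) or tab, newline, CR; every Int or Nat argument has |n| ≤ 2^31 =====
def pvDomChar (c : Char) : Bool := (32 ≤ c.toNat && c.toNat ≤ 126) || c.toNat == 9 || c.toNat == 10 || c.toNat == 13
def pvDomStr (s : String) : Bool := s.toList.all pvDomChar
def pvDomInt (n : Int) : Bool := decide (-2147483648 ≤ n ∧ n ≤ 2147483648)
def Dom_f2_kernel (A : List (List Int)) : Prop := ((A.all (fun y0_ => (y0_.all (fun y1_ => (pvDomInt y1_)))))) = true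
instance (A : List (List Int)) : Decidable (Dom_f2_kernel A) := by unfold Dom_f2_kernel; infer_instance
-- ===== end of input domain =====

-- B drops A's dead identity augmentation and splits the interleaved elimination into a forward
-- echelon pass (eliminating below pivots only) plus a separate back pass clearing entries above
-- each pivot; same asymptotic cost, fewer/narrower row operations.

-- ===== PORT A =====
-- Row primitives shared by both ports (these Python lines are textually identical in A and B):
-- `[a ^ b for a, b in zip(u, v)]`, the read `rows[i][c]` (in range under Pre_, the 0 default is
-- never used there), the simultaneous swap, the pivot search with break, and the extraction loop.
def pvXorRow (a b : List Int) : List Int := List.zipWith (fun x y => PySem.Int.bxor x y) a b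

def pvRowGet (rs : List (List Int)) (i c : Nat) : Int := (rs.getD i []).getD c 0

def pvSwap (rs : List (List Int)) (i j : Nat) : List (List Int) :=
  (rs.set i (rs.getD j [])).set j (rs.getD i [])

def pvFindPivot (rs : List (List Int)) (col r n : Nat) : Option Nat :=
  (List.range' r (n - r)).find? (fun i => pvRowGet rs i col == 1)

-- body of `if rows[i][col] == 1: rows[i] = [a ^ b for a, b in zip(rows[i], rows[r])]`
def pvElimRow (r col : Nat) (rs : List (List Int)) (i : Nat) : List (List Int) :=
  if pvRowGet rs i col == 1 then rs.set i (pvXorRow (rs.getD i []) (rs.getD r [])) else rs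

-- the kernel-extraction loop (identical source lines in A and B)
def pvExtract (nCols : Nat) (piv : List Nat) (rs : List (List Int)) : List (List Int) :=
  ((List.range nCols).filter (fun c => !(piv.contains c))).map (fun fc =>
    piv.zipIdx.foldl (fun v pc => v.set pc.1 (pvRowGet rs pc.2 fc))
      ((List.replicate nCols (0 : Int)).set fc 1))

-- A's per-column step: find pivot, swap it up, record the column, then eliminate the pivot
-- column from EVERY other row (above and below), on identity-augmented rows.
def pvStepA (n : Nat) (st : List (List Int) × List Nat) (col : Nat) : List (List Int) × List Nat :=
  match pvFindPivot st.1 col st.2.length n with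
  | none => st
  | some p =>
      ((List.range n).foldl
         (fun rs i => if i != st.2.length then pvElimRow st.2.length col rs i else rs)
         (pvSwap st.1 st.2.length p),
       st.2 ++ [col])

def f2_kernel (A : List (List Int)) : List (List Int) :=
  if A = [] then []
  else
    let nRows := A.length
    let nCols := (A.getD 0 []).length
    -- rows = [list(row) + [1 if i == j else 0 for j in range(n_cols)] for i, row in enumerate(A)]
    let rows0 := A.zipIdx.map (fun ri =>
      ri.1 ++ (List.range nCols).map (fun j => if ri.2 = j then (1 : Int) else 0))
    let st := (List.range nCols).foldl (pvStepA nRows) (rows0, ([] : List Nat))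
    pvExtract nCols st.2 st.1

-- ===== PORT B =====
-- forward step: eliminate the pivot column only from the rows BELOW the pivot position
def pvStepB (n : Nat) (st : List (List Int) × List Nat) (col : Nat) : List (List Int) × List Nat :=
  match pvFindPivot st.1 col st.2.length n with
  | none => st
  | some p =>
      ((List.range' (st.2.length + 1) (n - (st.2.length + 1))).foldl
         (pvElimRow st.2.length col)
         (pvSwap st.1 st.2.length p),
       st.2 ++ [col])

-- back pass: for each pivot (left to right) clear its column in the rows above it
def pvBack (piv : List Nat) (rs : List (List Int)) : List (List Int) :=
  piv.zipIdx.foldl (fun rs jc => (List.range jc.2).foldl (pvElimRow jc.2 jc.1) rs) rs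

def f2_kernel_alt (A : List (List Int)) : List (List Int) :=
  if A = [] then []
  else
    let nRows := A.length
    let nCols := (A.getD 0 []).length
    let st := (List.range nCols).foldl (pvStepB nRows) (A.map (fun r => r), ([] : List Nat))
    pvExtract nCols st.2 (pvBack st.2 st.1)

-- ===== PRECONDITION & SPEC =====
-- Pre_ excludes matrices having a row shorter than the first row: there Python A silently reads
-- entries of its dead identity augmentation as matrix entries (an accident of A's implementation)
-- while B's own algorithm raises IndexError; rows longer than the first are admitted.
def Pre_f2_kernel (A : List (List Int)) : Prop := ∀ row ∈ A, (A.getD 0 []).length ≤ row.length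
instance (A : List (List Int)) : Decidable (Pre_f2_kernel A) := by unfold Pre_f2_kernel; infer_instance

def pvWitness_f2_kernel : List (List Int) := [[1, 1, 0], [0, 1, 1]]

def Spec_f2_kernel (A : List (List Int)) (out : List (List Int)) : Prop := out = f2_kernel_alt A
instance (A : List (List Int)) (out : List (List Int)) : Decidable (Spec_f2_kernel A out) := by unfold Spec_f2_kernel; infer_instance

-- ===== CLAIM (what is proved, stated in full; the proofs are below) =====
def Claim_equal_f2_kernel : Prop := ∀ (A : List (List Int)), Dom_f2_kernel A → Pre_f2_kernel A → Spec_f2_kernel A (f2_kernel A)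

-- ===== LEMMAS AND PROOFS =====

-- projection to the first n columns (all the extraction reads; A's augmentation lives beyond it)
def pvProj (n : Nat) (rs : List (List Int)) : List (List Int) := rs.map (List.take n)

-- normal form of one elimination sweep: rows i with P i and a 1 in column c get row r xored in
def pvNF (P : Nat → Bool) (r c : Nat) (rs : List (List Int)) : List (List Int) :=
  rs.mapIdx (fun i row => if P i && (pvRowGet rs i c == 1) then pvXorRow row (rs.getD r []) else row)

-- the whole back pass, as a fold of upward normal forms
def pvUps (ps : List (Nat × Nat)) (rs : List (List Int)) : List (List Int) :=
  ps.foldl (fun rs jc => pvNF (fun i => i < jc.2) jc.2 jc.1 rs) rs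

-- ---------- basic getD facts ----------
lemma pvEqExt (X Y : List (List Int)) (hl : X.length = Y.length)
    (h : ∀ i, X.getD i [] = Y.getD i []) : X = Y := by
  apply List.ext_getElem hl
  intro i h1 h2
  have hh := h i
  rwa [List.getD_eq_getElem?_getD, List.getD_eq_getElem?_getD,
      List.getElem?_eq_getElem h1, List.getElem?_eq_getElem h2,
      Option.getD_some, Option.getD_some] at hh

lemma pvGetD_set (rs : List (List Int)) (i j : Nat) (v : List Int) :
    (rs.set i v).getD j [] = if j = i ∧ i < rs.length then v else rs.getD j [] := by
  rw [List.getD_eq_getElem?_getD (l := rs.set i v), List.getElem?_set,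
      List.getD_eq_getElem?_getD (l := rs)]
  by_cases h : i = j
  · subst h
    by_cases h2 : i < rs.length
    · rw [if_pos rfl, if_pos h2, if_pos ⟨rfl, h2⟩]; rfl
    · rw [if_pos rfl, if_neg h2, if_neg (fun hh => h2 hh.2),
          List.getElem?_eq_none (by omega)]
  · rw [if_neg h, if_neg (fun hh => h hh.1.symm)]

lemma pvRowGet_oob (rs : List (List Int)) (i c : Nat) (h : rs.length ≤ i) :
    pvRowGet rs i c = 0 := by
  simp [pvRowGet, List.getD_eq_getElem?_getD, List.getElem?_eq_none h]

lemma pvRowGet_lt_of_one (rs : List (List Int)) (i c : Nat) (h : pvRowGet rs i c = 1) :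
    i < rs.length := by
  by_contra hc
  rw [pvRowGet_oob rs i c (by omega)] at h
  exact absurd h (by norm_num)

lemma length_pvSwap (rs : List (List Int)) (i j : Nat) : (pvSwap rs i j).length = rs.length := by
  simp [pvSwap]

lemma getD_pvSwap (rs : List (List Int)) (a b i : Nat) (ha : a < rs.length) (hb : b < rs.length) :
    (pvSwap rs a b).getD i [] =
      if i = b then rs.getD a [] else if i = a then rs.getD b [] else rs.getD i [] := by
  unfold pvSwap
  rw [pvGetD_set, pvGetD_set]
  simp only [List.length_set]
  by_cases h1 : i = b <;> by_cases h2 : i = a <;> simp [h1, h2, ha, hb]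

lemma length_pvNF (P : Nat → Bool) (r c : Nat) (rs : List (List Int)) :
    (pvNF P r c rs).length = rs.length := by simp [pvNF]

lemma getD_pvNF (P : Nat → Bool) (r c : Nat) (rs : List (List Int)) (i : Nat) :
    (pvNF P r c rs).getD i [] =
      if P i && (pvRowGet rs i c == 1) then pvXorRow (rs.getD i []) (rs.getD r [])
      else rs.getD i [] := by
  by_cases hi : i < rs.length
  · have h1 : i < (pvNF P r c rs).length := by rw [length_pvNF]; exact hi
    rw [List.getD_eq_getElem?_getD (l := pvNF P r c rs), List.getElem?_eq_getElem h1,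
        Option.getD_some, List.getD_eq_getElem?_getD (l := rs) (i := i),
        List.getElem?_eq_getElem hi, Option.getD_some]
    simp [pvNF]
  · rw [List.getD_eq_getElem?_getD (l := pvNF P r c rs),
        List.getElem?_eq_none (by rw [length_pvNF]; omega),
        List.getD_eq_getElem?_getD (l := rs) (i := i), List.getElem?_eq_none (by omega)]
    have h0 : pvRowGet rs i c = 0 := pvRowGet_oob rs i c (by omega)
    simp [h0]

lemma getD_pvNF_not (P : Nat → Bool) (r c : Nat) (rs : List (List Int)) (i : Nat)
    (h : P i = false) : (pvNF P r c rs).getD i [] = rs.getD i [] := by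
  rw [getD_pvNF]; simp [h]

lemma pvRowGet_pvNF_not (P : Nat → Bool) (r c' c : Nat) (rs : List (List Int)) (i : Nat)
    (h : P i = false) : pvRowGet (pvNF P r c' rs) i c = pvRowGet rs i c := by
  unfold pvRowGet; rw [getD_pvNF_not _ _ _ _ _ h]

-- ---------- the generic elimination sweep ----------
-- a fold of the guarded row operation over distinct indices, the guard avoiding the pivot row,
-- equals the one-sweep normal-form description over the initial rows
lemma foldElimG_getD (Q : Nat → Bool) (r c : Nat) (idxs : List Nat) (rs : List (List Int))
    (hnd : idxs.Nodup) (hQ : ∀ j ∈ idxs, Q j = true → j ≠ r) (i : Nat) :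
    (idxs.foldl (fun rs j => if Q j then pvElimRow r c rs j else rs) rs).getD i [] =
      if (i ∈ idxs ∧ Q i) ∧ pvRowGet rs i c = 1
      then pvXorRow (rs.getD i []) (rs.getD r []) else rs.getD i [] := by
  induction idxs generalizing rs with
  | nil => simp
  | cons a t ih =>
    have hat : a ∉ t := (List.nodup_cons.mp hnd).1
    have hnd' : t.Nodup := (List.nodup_cons.mp hnd).2
    simp only [List.foldl_cons]
    rw [ih _ hnd' (fun j hj => hQ j (List.mem_cons_of_mem a hj))]
    set rs' := if Q a then pvElimRow r c rs a else rs with hrs'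
    have hother : ∀ j, j ≠ a → rs'.getD j [] = rs.getD j [] := by
      intro j hj
      rw [hrs']
      split
      · unfold pvElimRow
        split
        · rw [pvGetD_set]; simp [hj]
        · rfl
      · rfl
    have hpiv : rs'.getD r [] = rs.getD r [] := by
      rw [hrs']
      split
      · next hQa =>
        have : r ≠ a := fun h => (hQ a (List.mem_cons_self ..) hQa) h.symm
        unfold pvElimRow
        split
        · rw [pvGetD_set]; simp [this]
        · rfl
      · rfl
    rw [hpiv]
    by_cases hia : i = a
    · subst hia
      have hmem : i ∈ i :: t := List.mem_cons_self ..
      rw [if_neg (by intro hcontra; exact hat hcontra.1.1)]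
      by_cases hQi : Q i = true
      · rw [hrs', if_pos hQi]
        unfold pvElimRow
        by_cases hcond : pvRowGet rs i c = 1
        · have hlen : i < rs.length := pvRowGet_lt_of_one rs i c hcond
          rw [if_pos (by simp [hcond])]
          rw [pvGetD_set]
          simp [hlen, hmem, hcond, hQi]
        · rw [if_neg (by simp [hcond])]
          rw [if_neg (fun h => hcond h.2)]
      · have hQi' : Q i = false := by revert hQi; cases Q i <;> simp
        rw [hrs', if_neg (by simp [hQi'])]
        rw [if_neg (by intro hcontra; exact absurd hcontra.1.2 (by simp [hQi']))]
    · have hrg : pvRowGet rs' i c = pvRowGet rs i c := by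
        unfold pvRowGet; rw [hother i hia]
      rw [hrg, hother i hia]
      by_cases hmem : i ∈ t
      · simp [hmem, List.mem_cons, hia]
      · simp [hmem, List.mem_cons, hia]

lemma length_foldElimG (Q : Nat → Bool) (r c : Nat) (idxs : List Nat) (rs : List (List Int)) :
    (idxs.foldl (fun rs j => if Q j then pvElimRow r c rs j else rs) rs).length = rs.length := by
  induction idxs generalizing rs with
  | nil => rfl
  | cons a t ih =>
    simp only [List.foldl_cons]
    rw [ih]
    split
    · unfold pvElimRow; split <;> simp
    · rfl

lemma foldElim_eq_G (r c : Nat) (idxs : List Nat) (rs : List (List Int)) :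
    idxs.foldl (pvElimRow r c) rs =
      idxs.foldl (fun rs j => if (true : Bool) then pvElimRow r c rs j else rs) rs := by
  simp

-- ---------- the three sweeps of the two programs, in normal form ----------
lemma elimA_eq (r c n : Nat) (rs : List (List Int)) (hn : rs.length = n) :
    (List.range n).foldl (fun rs i => if i != r then pvElimRow r c rs i else rs) rs =
      pvNF (fun i => i != r) r c rs := by
  apply pvEqExt
  · rw [length_foldElimG, length_pvNF]
  · intro i
    rw [foldElimG_getD _ _ _ _ _ (List.nodup_range) (fun j _ hj => by simpa using hj), getD_pvNF]
    by_cases hg : pvRowGet rs i c = 1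
    · have hi : i < n := by rw [← hn]; exact pvRowGet_lt_of_one rs i c hg
      simp [List.mem_range, hi, hg]
    · simp [hg]

lemma elimB_eq (r c n : Nat) (rs : List (List Int)) (hn : rs.length = n) (hrn : r < n) :
    (List.range' (r + 1) (n - (r + 1))).foldl (pvElimRow r c) rs =
      pvNF (fun i => r < i) r c rs := by
  rw [foldElim_eq_G]
  apply pvEqExt
  · rw [length_foldElimG, length_pvNF]
  · intro i
    rw [foldElimG_getD _ _ _ _ _ (List.nodup_range' 1 (by norm_num))
          (fun j hj _ => by rw [List.mem_range'_1] at hj; omega) i, getD_pvNF]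
    by_cases hg : pvRowGet rs i c = 1
    · have hi : i < n := by rw [← hn]; exact pvRowGet_lt_of_one rs i c hg
      have : i ∈ List.range' (r + 1) (n - (r + 1)) ↔ r < i := by
        rw [List.mem_range'_1]; omega
      simp [this, hg]
    · simp [hg]

-- B's back pass is the fold of upward normal forms
lemma backInner_eq (j cj : Nat) (rs : List (List Int)) :
    (List.range j).foldl (pvElimRow j cj) rs = pvNF (fun i => i < j) j cj rs := by
  rw [foldElim_eq_G]
  apply pvEqExt
  · rw [length_foldElimG, length_pvNF]
  · intro i
    rw [foldElimG_getD _ _ _ _ _ (List.nodup_range)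
          (fun k hk _ => by rw [List.mem_range] at hk; omega) i, getD_pvNF]
    by_cases hg : pvRowGet rs i cj = 1
    · simp [List.mem_range, hg]
    · simp [hg]

lemma back_eq (piv : List Nat) (rs : List (List Int)) :
    pvBack piv rs = pvUps piv.zipIdx rs := by
  unfold pvBack pvUps
  have h : ∀ (ps : List (Nat × Nat)) (rs : List (List Int)),
      ps.foldl (fun rs jc => (List.range jc.2).foldl (pvElimRow jc.2 jc.1) rs) rs =
        ps.foldl (fun rs jc => pvNF (fun i => i < jc.2) jc.2 jc.1 rs) rs := by
    intro ps
    induction ps with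
    | nil => intro rs; rfl
    | cons a t ih => intro rs; simp only [List.foldl_cons]; rw [backInner_eq, ih]
  exact h piv.zipIdx rs

-- ---------- splitting A's interleaved sweep into below then above ----------
lemma nf_split (r c : Nat) (rs : List (List Int)) :
    pvNF (fun i => i != r) r c rs =
      pvNF (fun i => i < r) r c (pvNF (fun i => r < i) r c rs) := by
  apply pvEqExt
  · rw [length_pvNF, length_pvNF, length_pvNF]
  · intro i
    have hpiv : (pvNF (fun i => r < i) r c rs).getD r [] = rs.getD r [] :=
      getD_pvNF_not _ _ _ _ _ (by simp)
    rcases Nat.lt_trichotomy i r with h | h | h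
    · rw [getD_pvNF (fun i => i < r)]
      rw [pvRowGet_pvNF_not _ _ _ _ _ _ (by simp; omega),
          getD_pvNF_not (fun i => r < i) _ _ _ _ (by simp; omega), hpiv, getD_pvNF]
      have hne : (i != r) = true := by simp; omega
      simp [hne, h]
    · subst h
      rw [getD_pvNF_not _ _ _ _ _ (by simp), getD_pvNF_not _ _ _ _ _ (by simp),
          getD_pvNF_not _ _ _ _ _ (by simp)]
    · rw [getD_pvNF_not (fun i => i < r) _ _ _ _ (by simp; omega), getD_pvNF, getD_pvNF]
      have hne : (i != r) = true := by simp; omega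
      simp [hne, h]

-- ---------- commutations ----------
lemma nf_up_comm_swap (j cj a b : Nat) (rs : List (List Int))
    (hja : j < a) (hjb : j < b) (ha : a < rs.length) (hb : b < rs.length) :
    pvNF (fun i => i < j) j cj (pvSwap rs a b) = pvSwap (pvNF (fun i => i < j) j cj rs) a b := by
  apply pvEqExt
  · rw [length_pvNF, length_pvSwap, length_pvSwap, length_pvNF]
  · intro i
    have ha' : a < (pvNF (fun i => i < j) j cj rs).length := by rw [length_pvNF]; exact ha
    have hb' : b < (pvNF (fun i => i < j) j cj rs).length := by rw [length_pvNF]; exact hb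
    have hYa : (pvNF (fun i => i < j) j cj rs).getD a [] = rs.getD a [] :=
      getD_pvNF_not _ _ _ _ _ (by simp; omega)
    have hYb : (pvNF (fun i => i < j) j cj rs).getD b [] = rs.getD b [] :=
      getD_pvNF_not _ _ _ _ _ (by simp; omega)
    have hSj : (pvSwap rs a b).getD j [] = rs.getD j [] := by
      rw [getD_pvSwap _ _ _ _ ha hb, if_neg (by omega), if_neg (by omega)]
    rw [getD_pvNF, getD_pvSwap _ _ _ _ ha' hb', hSj, hYa, hYb]
    by_cases h1 : i = b
    · subst h1
      rw [if_pos rfl, if_neg (by simp; omega)]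
      rw [getD_pvSwap _ _ _ _ ha hb, if_pos rfl]
    · by_cases h2 : i = a
      · subst h2
        rw [if_neg h1, if_pos rfl, if_neg (by simp; omega)]
        rw [getD_pvSwap _ _ _ _ ha hb, if_neg h1, if_pos rfl]
      · have hSi : (pvSwap rs a b).getD i [] = rs.getD i [] := by
          rw [getD_pvSwap _ _ _ _ ha hb, if_neg h1, if_neg h2]
        have hrg : pvRowGet (pvSwap rs a b) i cj = pvRowGet rs i cj := by
          unfold pvRowGet; rw [hSi]
        rw [if_neg h1, if_neg h2, hSi, hrg, getD_pvNF]

lemma nf_up_comm_down (j cj r c : Nat) (rs : List (List Int)) (hjr : j ≤ r) :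
    pvNF (fun i => i < j) j cj (pvNF (fun i => r < i) r c rs) =
      pvNF (fun i => r < i) r c (pvNF (fun i => i < j) j cj rs) := by
  apply pvEqExt
  · simp [length_pvNF]
  · intro i
    have hDj : (pvNF (fun i => r < i) r c rs).getD j [] = rs.getD j [] :=
      getD_pvNF_not _ _ _ _ _ (by simp; omega)
    have hUr : (pvNF (fun i => i < j) j cj rs).getD r [] = rs.getD r [] :=
      getD_pvNF_not _ _ _ _ _ (by simp; omega)
    rw [getD_pvNF (fun i => i < j) j cj _ i, getD_pvNF (fun i => r < i) r c
          (pvNF (fun i => i < j) j cj rs) i, hDj, hUr]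
    by_cases h1 : i < j
    · have hDi : (pvNF (fun i => r < i) r c rs).getD i [] = rs.getD i [] :=
        getD_pvNF_not _ _ _ _ _ (by simp; omega)
      have hDrg : pvRowGet (pvNF (fun i => r < i) r c rs) i cj = pvRowGet rs i cj := by
        unfold pvRowGet; rw [hDi]
      rw [hDrg, hDi,
          if_neg (show ¬((decide (r < i) &&
            (pvRowGet (pvNF (fun i => i < j) j cj rs) i c == 1)) = true) from by simp; omega),
          getD_pvNF (fun i => i < j) j cj rs i]
    · by_cases h2 : r < i
      · have hUi : (pvNF (fun i => i < j) j cj rs).getD i [] = rs.getD i [] :=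
          getD_pvNF_not _ _ _ _ _ (by simp; omega)
        have hUrg : pvRowGet (pvNF (fun i => i < j) j cj rs) i c = pvRowGet rs i c := by
          unfold pvRowGet; rw [hUi]
        rw [hUi, hUrg,
            if_neg (show ¬((decide (i < j) &&
              (pvRowGet (pvNF (fun i => r < i) r c rs) i cj == 1)) = true) from by simp; omega),
            getD_pvNF (fun i => r < i) r c rs i]
      · have hDi : (pvNF (fun i => r < i) r c rs).getD i [] = rs.getD i [] :=
          getD_pvNF_not _ _ _ _ _ (by simp; omega)
        have hUi : (pvNF (fun i => i < j) j cj rs).getD i [] = rs.getD i [] :=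
          getD_pvNF_not _ _ _ _ _ (by simp; omega)
        rw [if_neg (show ¬((decide (i < j) &&
              (pvRowGet (pvNF (fun i => r < i) r c rs) i cj == 1)) = true) from by simp; omega),
            if_neg (show ¬((decide (r < i) &&
              (pvRowGet (pvNF (fun i => i < j) j cj rs) i c == 1)) = true) from by simp; omega),
            hDi, hUi]

lemma pvUps_cons (a : Nat × Nat) (t : List (Nat × Nat)) (rs : List (List Int)) :
    pvUps (a :: t) rs = pvUps t (pvNF (fun i => i < a.2) a.2 a.1 rs) := rfl

lemma length_pvUps (ps : List (Nat × Nat)) (rs : List (List Int)) :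
    (pvUps ps rs).length = rs.length := by
  induction ps generalizing rs with
  | nil => rfl
  | cons a t ih => rw [pvUps_cons, ih, length_pvNF]

lemma pvUps_append_one (ps : List (Nat × Nat)) (a : Nat × Nat) (rs : List (List Int)) :
    pvUps (ps ++ [a]) rs = pvNF (fun i => i < a.2) a.2 a.1 (pvUps ps rs) := by
  unfold pvUps
  rw [List.foldl_append]
  rfl

lemma ups_comm_swap (ps : List (Nat × Nat)) (a b : Nat) (rs : List (List Int))
    (hj : ∀ jc ∈ ps, jc.2 < a ∧ jc.2 < b) (ha : a < rs.length) (hb : b < rs.length) :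
    pvUps ps (pvSwap rs a b) = pvSwap (pvUps ps rs) a b := by
  induction ps generalizing rs with
  | nil => rfl
  | cons x t ih =>
    rw [pvUps_cons, pvUps_cons,
        nf_up_comm_swap x.2 x.1 a b rs (hj x (List.mem_cons_self ..)).1
          (hj x (List.mem_cons_self ..)).2 ha hb,
        ih _ (fun jc hjc => hj jc (List.mem_cons_of_mem x hjc))
          (by rw [length_pvNF]; exact ha) (by rw [length_pvNF]; exact hb)]

lemma ups_comm_down (ps : List (Nat × Nat)) (r c : Nat) (rs : List (List Int))
    (hj : ∀ jc ∈ ps, jc.2 ≤ r) :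
    pvUps ps (pvNF (fun i => r < i) r c rs) = pvNF (fun i => r < i) r c (pvUps ps rs) := by
  induction ps generalizing rs with
  | nil => rfl
  | cons x t ih =>
    rw [pvUps_cons, pvUps_cons,
        nf_up_comm_down x.2 x.1 r c rs (hj x (List.mem_cons_self ..)),
        ih _ (fun jc hjc => hj jc (List.mem_cons_of_mem x hjc))]

lemma ups_getD_high (ps : List (Nat × Nat)) (rs : List (List Int)) (i : Nat)
    (hj : ∀ jc ∈ ps, jc.2 ≤ i) : (pvUps ps rs).getD i [] = rs.getD i [] := by
  induction ps generalizing rs with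
  | nil => rfl
  | cons a t ih =>
    rw [pvUps_cons, ih _ (fun jc h => hj jc (List.mem_cons_of_mem a h))]
    exact getD_pvNF_not _ _ _ _ _ (by simp; have := hj a (List.mem_cons_self ..); omega)

-- ---------- projection facts ----------
lemma length_pvProj (n : Nat) (rs : List (List Int)) : (pvProj n rs).length = rs.length := by
  simp [pvProj]

lemma getD_pvProj (n : Nat) (rs : List (List Int)) (i : Nat) :
    (pvProj n rs).getD i [] = (rs.getD i []).take n := by
  by_cases hi : i < rs.length
  · rw [List.getD_eq_getElem?_getD (l := pvProj n rs),
        List.getElem?_eq_getElem (by rw [length_pvProj]; exact hi), Option.getD_some,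
        List.getD_eq_getElem?_getD (l := rs) (i := i), List.getElem?_eq_getElem hi,
        Option.getD_some]
    simp [pvProj]
  · rw [List.getD_eq_getElem?_getD (l := pvProj n rs),
        List.getElem?_eq_none (by rw [length_pvProj]; omega),
        List.getD_eq_getElem?_getD (l := rs) (i := i), List.getElem?_eq_none (by omega)]
    simp

lemma pvRowGet_proj (n : Nat) (rs : List (List Int)) (i c : Nat) (hc : c < n) :
    pvRowGet (pvProj n rs) i c = pvRowGet rs i c := by
  unfold pvRowGet
  rw [getD_pvProj]
  rw [List.getD_eq_getElem?_getD (l := (rs.getD i []).take n), List.getElem?_take_of_lt hc,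
      List.getD_eq_getElem?_getD (l := rs.getD i [])]

lemma take_pvXorRow (n : Nat) (a b : List Int) :
    (pvXorRow a b).take n = pvXorRow (a.take n) (b.take n) := by
  simp [pvXorRow, List.take_zipWith]

lemma proj_swap (n : Nat) (rs : List (List Int)) (a b : Nat)
    (ha : a < rs.length) (hb : b < rs.length) :
    pvProj n (pvSwap rs a b) = pvSwap (pvProj n rs) a b := by
  apply pvEqExt
  · rw [length_pvProj, length_pvSwap, length_pvSwap, length_pvProj]
  · intro i
    have ha' : a < (pvProj n rs).length := by rw [length_pvProj]; exact ha
    have hb' : b < (pvProj n rs).length := by rw [length_pvProj]; exact hb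
    rw [getD_pvProj, getD_pvSwap _ _ _ _ ha hb, getD_pvSwap _ _ _ _ ha' hb',
        getD_pvProj, getD_pvProj, getD_pvProj]
    split_ifs <;> rfl

lemma proj_nf (n : Nat) (P : Nat → Bool) (r c : Nat) (rs : List (List Int)) (hc : c < n) :
    pvProj n (pvNF P r c rs) = pvNF P r c (pvProj n rs) := by
  apply pvEqExt
  · rw [length_pvProj, length_pvNF, length_pvNF, length_pvProj]
  · intro i
    rw [getD_pvProj, getD_pvNF, getD_pvNF, pvRowGet_proj _ _ _ _ hc,
        getD_pvProj, getD_pvProj]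
    split_ifs with h
    · rw [take_pvXorRow]
    · rfl

-- ---------- the pivot search reads only rows ≥ r; the extraction only columns < nCols ----------
lemma find?_congr_mem (l : List Nat) (p q : Nat → Bool) (h : ∀ x ∈ l, p x = q x) :
    l.find? p = l.find? q := by
  induction l with
  | nil => rfl
  | cons a t ih =>
    simp only [List.find?_cons]
    rw [h a (List.mem_cons_self ..)]
    cases q a
    · exact ih (fun x hx => h x (List.mem_cons_of_mem a hx))
    · rfl

lemma findPivot_congr (X Y : List (List Int)) (c r n : Nat)
    (h : ∀ i, r ≤ i → pvRowGet X i c = pvRowGet Y i c) :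
    pvFindPivot X c r n = pvFindPivot Y c r n := by
  unfold pvFindPivot
  apply find?_congr_mem
  intro x hx
  rw [List.mem_range'_1] at hx
  rw [h x hx.1]

lemma extract_congr (nCols : Nat) (piv : List Nat) (X Y : List (List Int))
    (h : ∀ i c, c < nCols → pvRowGet X i c = pvRowGet Y i c) :
    pvExtract nCols piv X = pvExtract nCols piv Y := by
  unfold pvExtract
  apply List.map_congr_left
  intro fc hfc
  have hfcn : fc < nCols := by
    rw [List.mem_filter, List.mem_range] at hfc
    exact hfc.1
  have hfun : (fun (v : List Int) (pc : Nat × Nat) => v.set pc.1 (pvRowGet X pc.2 fc)) =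
      (fun v pc => v.set pc.1 (pvRowGet Y pc.2 fc)) := by
    funext v pc
    rw [h pc.2 fc hfcn]
  rw [hfun]

-- ---------- the main loop invariant ----------
lemma main_loop (n nR : Nat) (cols : List Nat) (hcols : ∀ c ∈ cols, c < n)
    (rsA rsB : List (List Int)) (piv : List Nat)
    (hA : rsA.length = nR) (hB : rsB.length = nR) (hp : piv.length ≤ nR)
    (hpc : ∀ c ∈ piv, c < n)
    (hproj : pvProj n rsA = pvProj n (pvUps piv.zipIdx rsB)) :
    (cols.foldl (pvStepA nR) (rsA, piv)).2 = (cols.foldl (pvStepB nR) (rsB, piv)).2 ∧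
    (cols.foldl (pvStepA nR) (rsA, piv)).1.length = nR ∧
    (cols.foldl (pvStepB nR) (rsB, piv)).1.length = nR ∧
    (cols.foldl (pvStepA nR) (rsA, piv)).2.length ≤ nR ∧
    (∀ c ∈ (cols.foldl (pvStepA nR) (rsA, piv)).2, c < n) ∧
    pvProj n (cols.foldl (pvStepA nR) (rsA, piv)).1 =
      pvProj n (pvUps ((cols.foldl (pvStepA nR) (rsA, piv)).2.zipIdx)
        ((cols.foldl (pvStepB nR) (rsB, piv)).1)) := by
  induction cols generalizing rsA rsB piv with
  | nil => exact ⟨rfl, hA, hB, hp, hpc, hproj⟩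
  | cons c cols ih =>
    have hcn : c < n := hcols c (List.mem_cons_self ..)
    have hzid : ∀ jc ∈ piv.zipIdx, jc.2 < piv.length := by
      intro jc hjc
      have := List.snd_lt_of_mem_zipIdx hjc
      omega
    have hfp : pvFindPivot rsA c piv.length nR = pvFindPivot rsB c piv.length nR := by
      apply findPivot_congr
      intro i hi
      calc pvRowGet rsA i c = pvRowGet (pvProj n rsA) i c := (pvRowGet_proj n rsA i c hcn).symm
        _ = pvRowGet (pvProj n (pvUps piv.zipIdx rsB)) i c := by rw [hproj]
        _ = pvRowGet (pvUps piv.zipIdx rsB) i c := pvRowGet_proj n _ i c hcn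
        _ = pvRowGet rsB i c := by
              unfold pvRowGet
              rw [ups_getD_high _ _ _ (fun jc hjc => by have := hzid jc hjc; omega)]
    simp only [List.foldl_cons]
    cases hfind : pvFindPivot rsB c piv.length nR with
    | none =>
      have hstepA : pvStepA nR (rsA, piv) c = (rsA, piv) := by
        unfold pvStepA
        rw [show (rsA, piv).2 = piv from rfl, show (rsA, piv).1 = rsA from rfl, hfp, hfind]
      have hstepB : pvStepB nR (rsB, piv) c = (rsB, piv) := by
        unfold pvStepB
        rw [show (rsB, piv).2 = piv from rfl, show (rsB, piv).1 = rsB from rfl, hfind]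
      rw [hstepA, hstepB]
      exact ih (fun x hx => hcols x (List.mem_cons_of_mem c hx)) rsA rsB piv hA hB hp hpc hproj
    | some p =>
      have hpmem : p ∈ List.range' piv.length (nR - piv.length) :=
        List.mem_of_find?_eq_some hfind
      rw [List.mem_range'_1] at hpmem
      have hrp : piv.length ≤ p := hpmem.1
      have hpn : p < nR := by omega
      have hrn : piv.length < nR := by omega
      have hstepA : pvStepA nR (rsA, piv) c =
          ((List.range nR).foldl
             (fun rs i => if i != piv.length then pvElimRow piv.length c rs i else rs)
             (pvSwap rsA piv.length p), piv ++ [c]) := by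
        unfold pvStepA
        rw [show (rsA, piv).2 = piv from rfl, show (rsA, piv).1 = rsA from rfl, hfp, hfind]
      have hstepB : pvStepB nR (rsB, piv) c =
          ((List.range' (piv.length + 1) (nR - (piv.length + 1))).foldl (pvElimRow piv.length c)
             (pvSwap rsB piv.length p), piv ++ [c]) := by
        unfold pvStepB
        rw [show (rsB, piv).2 = piv from rfl, show (rsB, piv).1 = rsB from rfl, hfind]
      rw [hstepA, hstepB]
      have hlenSA : (pvSwap rsA piv.length p).length = nR := by rw [length_pvSwap]; exact hA
      have hlenSB : (pvSwap rsB piv.length p).length = nR := by rw [length_pvSwap]; exact hB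
      have hA' : ((List.range nR).foldl
          (fun rs i => if i != piv.length then pvElimRow piv.length c rs i else rs)
          (pvSwap rsA piv.length p)).length = nR := by
        rw [length_foldElimG]; exact hlenSA
      have hB' : ((List.range' (piv.length + 1) (nR - (piv.length + 1))).foldl
          (pvElimRow piv.length c) (pvSwap rsB piv.length p)).length = nR := by
        rw [foldElim_eq_G, length_foldElimG]; exact hlenSB
      have hzip' : (piv ++ [c]).zipIdx = piv.zipIdx ++ [(c, piv.length)] := by
        rw [List.zipIdx_append, List.zipIdx_singleton]
        simp
      have hproj' :
          pvProj n ((List.range nR).foldl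
              (fun rs i => if i != piv.length then pvElimRow piv.length c rs i else rs)
              (pvSwap rsA piv.length p)) =
          pvProj n (pvUps ((piv ++ [c]).zipIdx)
              ((List.range' (piv.length + 1) (nR - (piv.length + 1))).foldl
                (pvElimRow piv.length c) (pvSwap rsB piv.length p))) := by
        rw [elimA_eq piv.length c nR _ hlenSA, elimB_eq piv.length c nR _ hlenSB hrn,
            nf_split, hzip', pvUps_append_one]
        have h1 : pvUps piv.zipIdx (pvNF (fun i => piv.length < i) piv.length c
              (pvSwap rsB piv.length p)) =
            pvNF (fun i => piv.length < i) piv.length c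
              (pvSwap (pvUps piv.zipIdx rsB) piv.length p) := by
          rw [ups_comm_down _ _ _ _ (fun jc hjc => by have := hzid jc hjc; omega),
              ups_comm_swap _ _ _ _ (fun jc hjc => ⟨by have := hzid jc hjc; omega,
                by have := hzid jc hjc; omega⟩) (by rw [hB]; exact hrn) (by rw [hB]; exact hpn)]
        rw [h1]
        rw [proj_nf _ _ _ _ _ hcn, proj_nf _ _ _ _ _ hcn,
            proj_nf _ _ _ _ _ hcn, proj_nf _ _ _ _ _ hcn]
        congr 1
        congr 1
        rw [proj_swap _ _ _ _ (by rw [hA]; exact hrn) (by rw [hA]; exact hpn),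
            proj_swap _ _ _ _ (by rw [length_pvUps, hB]; exact hrn)
              (by rw [length_pvUps, hB]; exact hpn)]
        rw [hproj]
      exact ih (fun x hx => hcols x (List.mem_cons_of_mem c hx)) _ _ (piv ++ [c]) hA' hB'
        (by simp only [List.length_append, List.length_cons, List.length_nil]; omega)
        (fun x hx => by
          rcases List.mem_append.mp hx with hmem | hmem
          · exact hpc x hmem
          · have hxc : x = c := by simpa using hmem
            rw [hxc]; exact hcn)
        hproj'

-- ---------- assembling the theorem ----------
lemma pvRowGet_eq_of_proj (n : Nat) (X Y : List (List Int)) (h : pvProj n X = pvProj n Y) :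
    ∀ i c, c < n → pvRowGet X i c = pvRowGet Y i c := by
  intro i c hc
  calc pvRowGet X i c = pvRowGet (pvProj n X) i c := (pvRowGet_proj n X i c hc).symm
    _ = pvRowGet (pvProj n Y) i c := by rw [h]
    _ = pvRowGet Y i c := pvRowGet_proj n Y i c hc

lemma init_proj (A : List (List Int)) (n : Nat) (hpre : ∀ row ∈ A, n ≤ row.length) :
    pvProj n (A.zipIdx.map (fun ri =>
      ri.1 ++ (List.range n).map (fun j => if ri.2 = j then (1 : Int) else 0))) = pvProj n A := by
  apply pvEqExt
  · simp [length_pvProj]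
  · intro i
    rw [getD_pvProj, getD_pvProj]
    by_cases hi : i < A.length
    · have h1 : (A.zipIdx.map (fun ri =>
          ri.1 ++ (List.range n).map (fun j => if ri.2 = j then (1 : Int) else 0))).getD i [] =
          A[i] ++ (List.range n).map (fun j => if i = j then (1 : Int) else 0) := by
        rw [List.getD_eq_getElem?_getD, List.getElem?_map, List.getElem?_zipIdx,
            List.getElem?_eq_getElem hi]
        simp
      rw [h1, List.take_append_of_le_length (hpre A[i] (List.getElem_mem hi)),
          List.getD_eq_getElem?_getD (l := A), List.getElem?_eq_getElem hi, Option.getD_some]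
    · rw [List.getD_eq_getElem?_getD, List.getElem?_eq_none (by simp; omega),
          List.getD_eq_getElem?_getD (l := A), List.getElem?_eq_none (by omega)]

-- ===== VERDICT (by name: the statement is the Claim_ definition above) =====
theorem f2_kernel_spec : Claim_equal_f2_kernel := by
  unfold Claim_equal_f2_kernel
  intro A _ hpre
  unfold Spec_f2_kernel f2_kernel f2_kernel_alt
  by_cases hA : A = []
  · simp [hA]
  · rw [if_neg hA, if_neg hA, List.map_id']
    have hmain := main_loop ((A.getD 0 []).length) A.length
      (List.range (A.getD 0 []).length) (fun c hc => List.mem_range.mp hc)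
      (A.zipIdx.map (fun ri =>
        ri.1 ++ (List.range (A.getD 0 []).length).map
          (fun j => if ri.2 = j then (1 : Int) else 0)))
      A [] (by simp) rfl (by simp) (by simp)
      (init_proj A _ hpre)
    obtain ⟨hpiv, -, -, -, -, hprojF⟩ := hmain
    have hfinal :
        pvExtract (A.getD 0 []).length
          (List.foldl (pvStepA A.length)
            (A.zipIdx.map (fun ri =>
              ri.1 ++ (List.range (A.getD 0 []).length).map
                (fun j => if ri.2 = j then (1 : Int) else 0)), [])
            (List.range (A.getD 0 []).length)).2
          (List.foldl (pvStepA A.length)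
            (A.zipIdx.map (fun ri =>
              ri.1 ++ (List.range (A.getD 0 []).length).map
                (fun j => if ri.2 = j then (1 : Int) else 0)), [])
            (List.range (A.getD 0 []).length)).1 =
        pvExtract (A.getD 0 []).length
          (List.foldl (pvStepB A.length) (A, []) (List.range (A.getD 0 []).length)).2
          (pvBack
            (List.foldl (pvStepB A.length) (A, []) (List.range (A.getD 0 []).length)).2
            (List.foldl (pvStepB A.length) (A, []) (List.range (A.getD 0 []).length)).1) := by
      rw [← hpiv, back_eq]
      exact extract_congr _ _ _ _ (pvRowGet_eq_of_proj _ _ _ hprojF)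
    exact hfinal
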